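-- pv_equiv track=rewrite | github.com/vedantkulkarni1234/internship_report | Project_no_2/firewall_core.py | _ip_matches_pattern
-- ===== SOURCE A (Python) =====
-- def _ip_matches_pattern(ip: str, pattern: str) -> bool:
--     """Check if IP matches pattern (supports wildcards like 192.168.*.*)"""
--     if pattern == "*":
--         return True
--
--     ip_parts = ip.split('.')
--     pattern_parts = pattern.split('.')
--
--     if len(ip_parts) != 4 or len(pattern_parts) != 4:
--         return False
--
--     for ip_part, pattern_part in zip(ip_parts, pattern_parts):
--         if pattern_part != "*" and ip_part != pattern_part:
--             return False
--
--     return True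
-- ===== SOURCE B (Python) =====
-- def _match(tokens, s):
--     """Recursive-descent matcher: consume one '.'-delimited segment of s per token."""
--     if len(tokens) == 1:
--         return '.' not in s and (tokens[0] == '*' or s == tokens[0])
--     parts = s.split('.', 1)
--     if len(parts) == 1:
--         return False
--     return (tokens[0] == '*' or parts[0] == tokens[0]) and _match(tokens[1:], parts[1])
--
--
-- def _ip_matches_pattern(ip: str, pattern: str) -> bool:
--     """Check if IP matches pattern (supports wildcards like 192.168.*.*)"""
--     if pattern == "*":
--         return True
--     tokens = pattern.split('.')
--     if len(tokens) != 4: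
--         return False
--     return _match(tokens, ip)
-- ===== Notes on version B (the rewrite author's own statement) =====
-- stated objective: alternative
-- what changed: A splits the ip, checks both lengths and zips the octet lists in one loop; B compiles the pattern into a token list once and then runs a recursive-descent matcher that consumes the raw ip string one '.'-delimited segment at a time via split('.', 1), never splitting the ip up front and never zipping.
import Mathlib
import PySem

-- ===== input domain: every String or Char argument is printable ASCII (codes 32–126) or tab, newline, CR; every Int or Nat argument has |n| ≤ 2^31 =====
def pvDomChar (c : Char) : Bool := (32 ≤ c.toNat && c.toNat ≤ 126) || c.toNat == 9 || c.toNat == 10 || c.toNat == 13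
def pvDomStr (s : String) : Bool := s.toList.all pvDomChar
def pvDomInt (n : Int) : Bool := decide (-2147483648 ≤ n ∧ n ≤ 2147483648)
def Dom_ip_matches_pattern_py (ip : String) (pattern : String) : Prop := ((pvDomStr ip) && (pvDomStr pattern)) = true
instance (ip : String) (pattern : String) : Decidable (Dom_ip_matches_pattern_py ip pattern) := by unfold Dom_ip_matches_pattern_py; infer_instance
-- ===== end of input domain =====

-- B replaces A's split-both-and-zip loop by compiling the pattern into a token list and
-- running a recursive-descent matcher that consumes the ip one '.'-segment at a time
-- (objective: alternative, same cost).

-- ===== PORT A =====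
def ip_matches_pattern_py (ip : String) (pattern : String) : Bool :=
  if pattern == "*" then true
  else
    let ip_parts := PySem.Chars.splitOn ip.toList ".".toList
    let pattern_parts := PySem.Chars.splitOn pattern.toList ".".toList
    if !(ip_parts.length == 4) || !(pattern_parts.length == 4) then false
    else
      -- for ip_part, pattern_part in zip(...): if pattern_part != "*" and ip_part != pattern_part: return False
      (ip_parts.zip pattern_parts).all
        (fun q => !(!(q.2 == "*".toList) && !(q.1 == q.2)))

-- ===== PORT B =====
-- port of Source B's _match: one token consumes one '.'-delimited segment of s (s.split('.', 1));
-- the [] case is unreachable (Python _match is only called with a 4-token list).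
def pvMatch : List (List Char) → List Char → Bool
  | [], _ => false
  | [p], s => !(PySem.Chars.isIn ".".toList s) && (p == "*".toList || s == p)
  | p :: q :: rest, s =>
      let parts := PySem.Chars.splitOnMax s ".".toList 1
      if parts.length == 1 then false
      else (p == "*".toList || parts.getD 0 [] == p) && pvMatch (q :: rest) (parts.getD 1 [])

def ip_matches_pattern_py_alt (ip : String) (pattern : String) : Bool :=
  if pattern == "*" then true
  else
    let tokens := PySem.Chars.splitOn pattern.toList ".".toList
    if !(tokens.length == 4) then false
    else pvMatch tokens ip.toList

-- ===== PRECONDITION & SPEC =====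
def Spec_ip_matches_pattern_py (ip : String) (pattern : String) (out : Bool) : Prop := out = ip_matches_pattern_py_alt ip pattern
instance (ip : String) (pattern : String) (out : Bool) : Decidable (Spec_ip_matches_pattern_py ip pattern out) := by unfold Spec_ip_matches_pattern_py; infer_instance

-- ===== CLAIM (what is proved, stated in full; the proofs are below) =====
def Claim_equal_ip_matches_pattern_py : Prop := ∀ (ip : String) (pattern : String), Dom_ip_matches_pattern_py ip pattern → Spec_ip_matches_pattern_py ip pattern (ip_matches_pattern_py ip pattern)

-- ===== LEMMAS AND PROOFS =====

theorem pvModifyHead_id {A : Type} (l : List A) : List.modifyHead (fun x => x) l = l := by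
  cases l <;> rfl

-- PySem's fuelled single-character split agrees with Mathlib's List.splitOn.
theorem pvGo_eq (c : Char) (fuel : Nat) (l cur : List Char) (acc : List (List Char)) (h : l.length < fuel) :
    PySem.Chars.splitOn.go [c] fuel l cur acc
      = acc.reverse ++ (l.splitOn c).modifyHead (cur.reverse ++ ·) := by
  induction fuel generalizing l cur acc with
  | zero => omega
  | succ n ih =>
    cases l with
    | nil =>
      simp [PySem.Chars.splitOn.go, List.splitOn]
    | cons x rest =>
      simp only [PySem.Chars.splitOn.go, List.isPrefixOf, List.splitOn, List.splitOnP_cons]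
      by_cases hx : c = x
      · subst hx
        simp only [beq_self_eq_true, Bool.true_and, if_pos]
        rw [ih _ _ _ (by simpa using Nat.lt_of_succ_lt_succ h)]
        simp [List.splitOn, pvModifyHead_id]
      · have hbx : (c == x) = false := by simpa using hx
        have hpx : (x == c) = false := by simpa using (Ne.symm hx)
        simp only [hbx, hpx, Bool.false_and, if_neg, Bool.false_eq_true, not_false_iff]
        rw [ih _ _ _ (by simpa using Nat.lt_of_succ_lt_succ h)]
        have hne := List.splitOnP_ne_nil (fun a => a == c) rest
        obtain ⟨hd, tl, heq⟩ := List.exists_cons_of_ne_nil hne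
        simp [List.splitOn, heq]

theorem pvSplitOn_eq (s : List Char) (c : Char) :
    PySem.Chars.splitOn s [c] = s.splitOn c := by
  unfold PySem.Chars.splitOn
  rw [pvGo_eq c (s.length + 1) s [] [] (Nat.lt_succ_self _)]
  simp [pvModifyHead_id]

-- List.splitOn on a character not in the string.
theorem pvSplitOn_no_dot (s : List Char) (h : '.' ∉ s) : s.splitOn '.' = [s] := by
  induction s with
  | nil => rfl
  | cons x rest ih =>
    simp only [List.mem_cons, not_or] at h
    have hx : (x == '.') = false := by simpa using (Ne.symm h.1)
    simp only [List.splitOn, List.splitOnP_cons, hx, Bool.false_eq_true, if_neg, not_false_iff]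
    have := ih h.2
    simp only [List.splitOn] at this
    simp [this]

-- List.splitOn recursion step when the character occurs.
theorem pvSplitOn_dot (s : List Char) (h : '.' ∈ s) :
    s.splitOn '.' = s.takeWhile (fun c => c != '.')
      :: ((s.dropWhile (fun c => c != '.')).tail).splitOn '.' := by
  induction s with
  | nil => simp at h
  | cons x rest ih =>
    by_cases hx : x = '.'
    · subst hx
      simp [List.splitOn, List.splitOnP_cons, List.takeWhile, List.dropWhile]
    · have hbx : (x == '.') = false := by simpa using hx
      have hm : '.' ∈ rest := by
        rcases List.mem_cons.mp h with h1 | h1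
        · exact absurd h1.symm hx
        · exact h1
      simp only [List.splitOn, List.splitOnP_cons]
      have hbc : (x != '.') = true := by simpa using hx
      have := ih hm
      simp only [List.splitOn] at this
      simp [List.splitOnP_cons, hbx, hbc, this]

-- [a] is an infix of l iff a is a member of l.
theorem pvSingletonInfix (a : Char) (l : List Char) : [a] <:+: l ↔ a ∈ l := by
  constructor
  · rintro ⟨u, v, rfl⟩; simp
  · intro hm
    obtain ⟨u, v, rfl⟩ := List.append_of_mem hm
    exact ⟨u, v, by simp⟩

-- splitOnMax.go with maxsplit exhausted returns the remainder as one piece.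
theorem pvGoMax0 (fuel : Nat) (l cur : List Char) (acc : List (List Char)) :
    PySem.Chars.splitOnMax.go ['.'] fuel 0 l cur acc = ((cur.reverse ++ l) :: acc).reverse := by
  cases fuel with
  | zero => rfl
  | succ n =>
    cases l with
    | nil => simp [PySem.Chars.splitOnMax.go]
    | cons c rest => simp [PySem.Chars.splitOnMax.go]

-- splitOnMax.go with maxsplit 1: split once at the first '.', if any.
theorem pvGoMax1 (fuel : Nat) (l cur : List Char) (acc : List (List Char)) (h : l.length < fuel) :
    PySem.Chars.splitOnMax.go ['.'] fuel 1 l cur acc =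
      acc.reverse ++ (if '.' ∈ l
        then [cur.reverse ++ l.takeWhile (fun c => c != '.'), (l.dropWhile (fun c => c != '.')).tail]
        else [cur.reverse ++ l]) := by
  induction fuel generalizing l cur acc with
  | zero => omega
  | succ n ih =>
    cases l with
    | nil => simp [PySem.Chars.splitOnMax.go]
    | cons c rest =>
      by_cases hc : c = '.'
      · subst hc
        simp only [PySem.Chars.splitOnMax.go, List.isPrefixOf, beq_self_eq_true, Bool.true_and]
        rw [if_neg (by omega)]
        simp only [List.isPrefixOf, beq_self_eq_true, Bool.true_and, if_pos]
        rw [pvGoMax0]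
        simp [List.takeWhile, List.dropWhile]
      · have hb : ('.' == c) = false := by simpa using (Ne.symm hc)
        simp only [PySem.Chars.splitOnMax.go, List.isPrefixOf, hb, Bool.false_and,
          Bool.false_eq_true, if_neg, not_false_iff]
        rw [if_neg (by omega)]
        rw [ih rest (c :: cur) acc (by simpa using Nat.lt_of_succ_lt_succ h)]
        have hbc : (c != '.') = true := by simpa using hc
        by_cases hm : '.' ∈ rest
        · have hml : '.' ∈ c :: rest := List.mem_cons_of_mem _ hm
          simp [hm, hml, List.takeWhile, List.dropWhile, hbc]
        · have hml : '.' ∉ c :: rest := by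
            simp [List.mem_cons, hm]; exact fun h' => absurd h'.symm hc
          simp [hm, hml]

theorem pvSplitOnMax1 (s : List Char) :
    PySem.Chars.splitOnMax s ['.'] 1 =
      if '.' ∈ s then [s.takeWhile (fun c => c != '.'), (s.dropWhile (fun c => c != '.')).tail]
      else [s] := by
  unfold PySem.Chars.splitOnMax
  rw [if_neg (by omega)]
  rw [show (1 : Int).toNat = 1 from rfl]
  rw [pvGoMax1 (s.length + 1) s [] [] (Nat.lt_succ_self _)]
  simp

-- splitOn is never empty.
theorem pvSplitOn_ne_nil (s : List Char) : s.splitOn '.' ≠ [] := by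
  simpa [List.splitOn] using List.splitOnP_ne_nil (fun a => a == '.') s

-- The matcher decides "the ip splits into exactly as many segments as there are tokens,
-- and every segment equals its token unless the token is '*'".
theorem pvMatch_eq (ps : List (List Char)) (s : List Char) (h : ps ≠ []) :
    pvMatch ps s = ((s.splitOn '.').length == ps.length
      && ((s.splitOn '.').zip ps).all (fun q => q.2 == "*".toList || q.1 == q.2)) := by
  have hdot : (".".toList) = ['.'] := by decide
  induction ps generalizing s with
  | nil => exact absurd rfl h
  | cons p rest ih =>
    cases rest with
    | nil =>
      by_cases hm : '.' ∈ s
      · have hin : PySem.Chars.isIn ['.'] s = true := by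
          rw [PySem.Chars.isIn_iff_infix, pvSingletonInfix]; exact hm
        rw [pvSplitOn_dot s hm]
        have hlen : ((s.dropWhile (fun c => c != '.')).tail).splitOn '.' ≠ [] :=
          pvSplitOn_ne_nil _
        obtain ⟨hd, tl, heq⟩ := List.exists_cons_of_ne_nil hlen
        simp [pvMatch, hin, heq]
      · have hin : PySem.Chars.isIn ['.'] s = false := by
          rw [PySem.Chars.isIn_eq_false_iff, pvSingletonInfix]; exact hm
        rw [pvSplitOn_no_dot s hm]
        simp [pvMatch, hin]
    | cons q rest' =>
      rw [pvMatch]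
      rw [hdot, pvSplitOnMax1 s]
      by_cases hm : '.' ∈ s
      · rw [if_pos hm]
        simp only [List.length_cons, List.length_nil]
        rw [if_neg (by simp)]
        simp only [List.getD, List.getElem?_cons_zero, Option.getD_some,
          List.getElem?_cons_succ]
        rw [ih _ (by simp)]
        rw [pvSplitOn_dot s hm]
        set tw := s.takeWhile (fun c => c != '.')
        set tlr := ((s.dropWhile (fun c => c != '.')).tail).splitOn '.'
        rw [Bool.eq_iff_iff]
        simp only [Bool.and_eq_true, Bool.or_eq_true, List.length_cons, List.zip_cons_cons,
          List.all_cons, beq_iff_eq, Nat.add_left_inj]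
        tauto
      · rw [if_neg hm]
        simp only [List.length_cons, List.length_nil, Nat.zero_add]
        rw [if_pos (by simp)]
        rw [pvSplitOn_no_dot s hm]
        simp

-- ===== VERDICT (by name: the statement is the Claim_ definition above) =====
theorem ip_matches_pattern_py_spec : Claim_equal_ip_matches_pattern_py := by
  intro ip pattern _
  unfold Spec_ip_matches_pattern_py ip_matches_pattern_py ip_matches_pattern_py_alt
  by_cases hstar : pattern == "*"
  · simp [hstar]
  · simp only [hstar, Bool.false_eq_true, if_false]
    have hdot : (".".toList) = ['.'] := by decide
    rw [hdot, pvSplitOn_eq, pvSplitOn_eq]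
    set ipp := ip.toList.splitOn '.' with hipp
    set pp := pattern.toList.splitOn '.' with hpp
    by_cases hl : pp.length = 4
    · have hne : pp ≠ [] := by intro h; rw [h] at hl; simp at hl
      simp only [hl, beq_self_eq_true, Bool.not_true, Bool.or_false, Bool.false_eq_true,
        if_false]
      rw [pvMatch_eq pp ip.toList hne, ← hipp, hl]
      by_cases hil : ipp.length = 4
      · simp only [hil, beq_self_eq_true, Bool.not_true, Bool.false_eq_true, if_false,
          Bool.true_and]
        congr 1
        funext q
        by_cases h1 : q.2 = "*".toList <;> by_cases h2 : q.1 = q.2 <;> simp [h1, h2]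
      · have : (ipp.length == 4) = false := by simpa using hil
        simp [this]
    · have h4 : (pp.length == 4) = false := by simpa using hl
      simp [h4]
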